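-- pv_equiv track=rewrite | github.com/nikuya3/tic-tac-toe-rl | toe.py | permutate_all_states
-- ===== SOURCE A (Python) =====
-- def permutate_all_states(tics):
--     # 0: none, 1: X, 2: O
--     states = []
--     for nr in range(9):
--         prev_states = states
--         states = []
--         for s in range(len(tics)):
--             if nr == 0:
--                 states.append(str(s))
--             else:
--                 temp_prev_states = prev_states.copy()
--                 for i in range(len(prev_states)):
--                     temp_prev_states[i] = temp_prev_states[i] + str(s)
--                 states.extend(temp_prev_states)
--     return states
-- ===== SOURCE B (Python) =====
-- def permutate_all_states(tics):
--     k = len(tics)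
--     lows = [''.join(str((i // k**j) % k) for j in range(4)) for i in range(k**4)]
--     highs = [''.join(str((i // k**j) % k) for j in range(5)) for i in range(k**5)]
--     return [l + h for h in highs for l in lows]
-- ===== Notes on version B (the rewrite author's own statement) =====
-- stated objective: faster
-- what changed: Replaces the layer-by-layer list rebuilding (copy, in-place suffixing and extend per layer) with a closed-form base-k index decode, meet-in-the-middle: all k^4 low halves and k^5 high halves are decoded from their index by base-k arithmetic and the k^9 states are formed by one cross-concatenation.
import Mathlib
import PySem

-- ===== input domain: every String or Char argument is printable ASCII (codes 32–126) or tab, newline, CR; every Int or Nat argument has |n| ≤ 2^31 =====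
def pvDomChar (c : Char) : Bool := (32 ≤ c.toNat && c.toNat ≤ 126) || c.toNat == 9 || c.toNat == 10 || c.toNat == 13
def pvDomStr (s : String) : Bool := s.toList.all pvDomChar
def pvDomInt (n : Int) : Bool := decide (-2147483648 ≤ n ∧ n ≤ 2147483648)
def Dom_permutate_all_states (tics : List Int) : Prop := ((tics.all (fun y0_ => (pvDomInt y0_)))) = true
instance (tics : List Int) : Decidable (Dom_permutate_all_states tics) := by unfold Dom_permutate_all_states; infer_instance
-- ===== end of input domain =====

-- B replaces A's layer-by-layer list rebuilding by a closed-form base-k decoding of each state index; objective: simpler.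


-- ===== PORT A =====
-- literal port: outer loop over range(9); each layer rebuilds 'states' from the
-- previous layer, appending str(s) (layer 0) or suffixing every previous state.
def permutate_all_states (tics : List Int) : List String :=
  (List.range 9).foldl
    (fun states nr =>
      (List.range tics.length).foldl
        (fun acc (s : Nat) =>
          if nr == 0 then acc ++ [PySem.Int.toStr (s : Int)]
          else acc ++ states.map (fun t => t ++ PySem.Int.toStr (s : Int)))
        [])
    []

-- ===== PORT B =====
-- literal port of Source B: decode low/high half-states from their index by base-k
-- arithmetic, then form every state by one cross-concatenation.
def permutate_all_states_alt (tics : List Int) : List String :=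
  let k := tics.length
  let lows := (List.range (k ^ 4)).map
    (fun i => PySem.Str.join ""
      ((List.range 4).map (fun j => PySem.Int.toStr (((i / k ^ j) % k : Nat) : Int))))
  let highs := (List.range (k ^ 5)).map
    (fun i => PySem.Str.join ""
      ((List.range 5).map (fun j => PySem.Int.toStr (((i / k ^ j) % k : Nat) : Int))))
  highs.flatMap (fun h => lows.map (fun l => l ++ h))

-- ===== PRECONDITION & SPEC =====
def Spec_permutate_all_states (tics : List Int) (out : List String) : Prop := out = permutate_all_states_alt tics
instance (tics : List Int) (out : List String) : Decidable (Spec_permutate_all_states tics out) := by unfold Spec_permutate_all_states; infer_instance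

-- ===== CLAIM (what is proved, stated in full; the proofs are below) =====
def Claim_equal_permutate_all_states : Prop := ∀ (tics : List Int), Dom_permutate_all_states tics → Spec_permutate_all_states tics (permutate_all_states tics)

-- ===== LEMMAS AND PROOFS =====

-- the list of base-k digit strings of index i, and the m-digit state string
def pvDigits (k m i : Nat) : List String :=
  (List.range m).map (fun j => PySem.Int.toStr (((i / k ^ j) % k : Nat) : Int))

def pvState (k m i : Nat) : String := PySem.Str.join "" (pvDigits k m i)

theorem pv_chars_join_append_one (l : List (List Char)) (x : List Char) :
    PySem.Chars.join [] (l ++ [x]) = PySem.Chars.join [] l ++ x := by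
  induction l with
  | nil => simp [PySem.Chars.join_nil, PySem.Chars.join_singleton]
  | cons a l ih =>
      cases l with
      | nil =>
          simp [PySem.Chars.join_singleton, PySem.Chars.join_cons_cons]
      | cons b t =>
          simp only [List.cons_append] at ih ⊢
          rw [PySem.Chars.join_cons_cons, PySem.Chars.join_cons_cons, ih]
          simp [List.append_assoc]

theorem pv_join_append_one (l : List String) (x : String) :
    PySem.Str.join "" (l ++ [x]) = PySem.Str.join "" l ++ x := by
  apply String.toList_inj.mp
  rw [String.toList_append]
  rw [PySem.Str.toList_join, PySem.Str.toList_join]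
  simp only [List.map_append, List.map_cons, List.map_nil]
  exact pv_chars_join_append_one (l.map String.toList) x.toList

theorem pv_join_one (x : String) : PySem.Str.join "" [x] = x := by
  have h := pv_join_append_one [] x
  simpa using h

theorem pv_range_mul_flatMap {α : Type} (k n : Nat) (h : Nat → α) :
    (List.range k).flatMap (fun s => (List.range n).map (fun i => h (s * n + i)))
      = (List.range (k * n)).map h := by
  induction k with
  | zero => simp
  | succ k ih =>
      rw [List.range_succ, List.flatMap_append, ih, Nat.succ_mul, List.range_add]
      simp [List.map_map, Function.comp]

theorem pv_flatMap_congr {α β : Type} (l : List α) (f g : α → List β)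
    (h : ∀ a ∈ l, f a = g a) : l.flatMap f = l.flatMap g := by
  induction l with
  | nil => rfl
  | cons a t ih =>
      rw [List.flatMap_cons, List.flatMap_cons, h a (List.mem_cons_self),
        ih (fun b hb => h b (List.mem_cons_of_mem a hb))]

theorem pv_digits_low (k m s i : Nat) (hk : 0 < k) :
    pvDigits k m (s * k ^ m + i) = pvDigits k m i := by
  unfold pvDigits
  apply List.map_congr_left
  intro j hj
  have hjm : j < m := List.mem_range.mp hj
  have hm : k ^ m = k ^ j * k ^ (m - j) := by
    rw [← pow_add]
    congr 1
    omega
  have h1 : (s * k ^ m + i) / k ^ j = s * k ^ (m - j) + i / k ^ j := by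
    rw [hm, show s * (k ^ j * k ^ (m - j)) = k ^ j * (s * k ^ (m - j)) by ring,
      Nat.mul_add_div (pow_pos hk j)]
  have h2 : s * k ^ (m - j) = s * k ^ (m - j - 1) * k := by
    rw [Nat.mul_assoc, ← pow_succ]
    congr 2
    omega
  rw [h1, h2, Nat.mul_comm (s * k ^ (m - j - 1)) k, Nat.mul_add_mod]

theorem pv_digits_add (k m s i : Nat) (hk : 0 < k) (hi : i < k ^ m) (hs : s < k) :
    pvDigits k (m + 1) (s * k ^ m + i) = pvDigits k m i ++ [PySem.Int.toStr (s : Int)] := by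
  have hstep : pvDigits k (m + 1) (s * k ^ m + i)
      = pvDigits k m (s * k ^ m + i)
        ++ [PySem.Int.toStr (((s * k ^ m + i) / k ^ m % k : Nat) : Int)] := by
    simp [pvDigits, List.range_succ]
  have hlast : (s * k ^ m + i) / k ^ m % k = s := by
    rw [Nat.mul_comm s (k ^ m), Nat.mul_add_div (pow_pos hk m), Nat.div_eq_of_lt hi,
      Nat.add_zero, Nat.mod_eq_of_lt hs]
  have hsame : pvDigits k m (s * k ^ m + i) = pvDigits k m i := pv_digits_low k m s i hk
  rw [hstep, hlast, hsame]

theorem pv_state_add (k m s i : Nat) (hk : 0 < k) (hi : i < k ^ m) (hs : s < k) :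
    pvState k (m + 1) (s * k ^ m + i) = pvState k m i ++ PySem.Int.toStr (s : Int) := by
  unfold pvState
  rw [pv_digits_add k m s i hk hi hs, pv_join_append_one]

-- the outer-loop invariant: after m layers, states enumerates all k^m state strings
theorem pv_layers (k : Nat) (m : Nat) :
    (List.range m).foldl
      (fun states nr =>
        (List.range k).foldl
          (fun acc (s : Nat) =>
            if nr == 0 then acc ++ [PySem.Int.toStr (s : Int)]
            else acc ++ states.map (fun t => t ++ PySem.Int.toStr (s : Int)))
          [])
      []
    = if m = 0 then [] else (List.range (k ^ m)).map (pvState k m) := by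
  induction m with
  | zero => simp
  | succ m ih =>
      rw [List.range_succ, List.foldl_append, List.foldl_cons, List.foldl_nil, ih]
      rw [if_neg (Nat.succ_ne_zero m)]
      by_cases hm : m = 0
      · subst hm
        have h0 : ((0 : Nat) == 0) = true := rfl
        simp only [h0, if_true]
        rw [PySem.List.foldl_append_singleton_eq_map, List.nil_append, pow_one]
        apply List.map_congr_left
        intro s hs
        have hsk : s < k := List.mem_range.mp hs
        have hr : List.range (0 + 1) = [0] := rfl
        simp only [pvState, pvDigits, hr, List.map_cons, List.map_nil]
        rw [pv_join_one, pow_zero, Nat.div_one, Nat.mod_eq_of_lt hsk]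
      · rw [if_neg hm]
        have hne : (m == 0) = false := by simp [hm]
        simp only [hne, Bool.false_eq_true, if_false]
        rw [PySem.List.foldl_append_eq_flatMap, List.nil_append]
        by_cases hk : k = 0
        · subst hk
          simp
        · have hk' : 0 < k := Nat.pos_of_ne_zero hk
          have hstep : (List.range k).flatMap
                (fun (s : Nat) => ((List.range (k ^ m)).map (pvState k m)).map
                  (fun t => t ++ PySem.Int.toStr (s : Int)))
              = (List.range k).flatMap
                (fun (s : Nat) => (List.range (k ^ m)).map (fun i => pvState k (m + 1) (s * k ^ m + i))) := by
            apply pv_flatMap_congr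
            intro s hs
            rw [List.map_map]
            apply List.map_congr_left
            intro i hi
            exact (pv_state_add k m s i hk' (List.mem_range.mp hi) (List.mem_range.mp hs)).symm
          rw [hstep, pv_range_mul_flatMap, pow_succ, Nat.mul_comm (k ^ m) k]

theorem pv_chars_join_append (l1 l2 : List (List Char)) :
    PySem.Chars.join [] (l1 ++ l2) = PySem.Chars.join [] l1 ++ PySem.Chars.join [] l2 := by
  induction l2 using List.reverseRecOn with
  | nil => simp [PySem.Chars.join_nil]
  | append_singleton t x ih =>
      rw [show l1 ++ (t ++ [x]) = (l1 ++ t) ++ [x] from (List.append_assoc l1 t [x]).symm,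
        pv_chars_join_append_one, ih, pv_chars_join_append_one, List.append_assoc]

theorem pv_join_append (l1 l2 : List String) :
    PySem.Str.join "" (l1 ++ l2) = PySem.Str.join "" l1 ++ PySem.Str.join "" l2 := by
  apply String.toList_inj.mp
  rw [String.toList_append, PySem.Str.toList_join, PySem.Str.toList_join, PySem.Str.toList_join]
  simp only [List.map_append]
  exact pv_chars_join_append (l1.map String.toList) (l2.map String.toList)

theorem pv_digits_succ (k m n : Nat) :
    pvDigits k (m + 1) n = pvDigits k m n ++ [PySem.Int.toStr ((n / k ^ m % k : Nat) : Int)] := by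
  simp [pvDigits, List.range_succ]

theorem pv_digits_split (k m n s i : Nat) (hk : 0 < k) (hi : i < k ^ m) :
    pvDigits k (m + n) (s * k ^ m + i) = pvDigits k m i ++ pvDigits k n s := by
  induction n with
  | zero => simpa [pvDigits] using pv_digits_low k m s i hk
  | succ n ih =>
      have hNm : (s * k ^ m + i) / k ^ m = s := by
        rw [Nat.mul_comm s (k ^ m), Nat.mul_add_div (pow_pos hk m), Nat.div_eq_of_lt hi,
          Nat.add_zero]
      have hdig : (s * k ^ m + i) / k ^ (m + n) % k = s / k ^ n % k := by
        rw [pow_add, ← Nat.div_div_eq_div_mul, hNm]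
      rw [show m + (n + 1) = (m + n) + 1 by omega, pv_digits_succ, ih, hdig,
        pv_digits_succ k n s, List.append_assoc]

theorem pv_state_split (k m n s i : Nat) (hk : 0 < k) (hi : i < k ^ m) :
    pvState k (m + n) (s * k ^ m + i) = pvState k m i ++ pvState k n s := by
  unfold pvState
  rw [pv_digits_split k m n s i hk hi, pv_join_append]

theorem pv_flatMap_map {α β γ : Type} (l : List α) (f : α → β) (g : β → List γ) :
    (l.map f).flatMap g = l.flatMap (fun x => g (f x)) := by
  induction l with
  | nil => rfl
  | cons a t ih => simp only [List.map_cons, List.flatMap_cons, ih]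

-- ===== VERDICT (by name: the statement is the Claim_ definition above) =====
theorem permutate_all_states_spec : Claim_equal_permutate_all_states := by
  intro tics _
  unfold Spec_permutate_all_states permutate_all_states permutate_all_states_alt
  rw [pv_layers tics.length 9, if_neg (by norm_num : (9 : Nat) ≠ 0)]
  by_cases hk0 : tics.length = 0
  · simp [hk0, zero_pow]
  · have hkpos : 0 < tics.length := Nat.pos_of_ne_zero hk0
    show List.map (pvState tics.length 9) (List.range (tics.length ^ 9))
      = ((List.range (tics.length ^ 5)).map (pvState tics.length 5)).flatMap
          (fun h => ((List.range (tics.length ^ 4)).map (pvState tics.length 4)).map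
            (fun l => l ++ h))
    rw [pv_flatMap_map]
    have hstep : (List.range (tics.length ^ 5)).flatMap
          (fun (hi : Nat) => ((List.range (tics.length ^ 4)).map (pvState tics.length 4)).map
            (fun l => l ++ pvState tics.length 5 hi))
        = (List.range (tics.length ^ 5)).flatMap
          (fun (hi : Nat) => (List.range (tics.length ^ 4)).map
            (fun lo => pvState tics.length 9 (hi * tics.length ^ 4 + lo))) := by
      apply pv_flatMap_congr
      intro hi _
      rw [List.map_map]
      apply List.map_congr_left
      intro lo hlo
      have h := pv_state_split tics.length 4 5 hi lo hkpos (List.mem_range.mp hlo)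
      rw [show (4 : Nat) + 5 = 9 from rfl] at h
      exact h.symm
    rw [hstep, pv_range_mul_flatMap, show tics.length ^ 5 * tics.length ^ 4 = tics.length ^ 9 by
      rw [← pow_add]]
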